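-- pv_equiv track=rewrite | github.com/tamil-phy/tamil_tokenizer | tamil_tokenizer/grammar/tamil_util.py | _index_match
-- ===== SOURCE A (Python) =====
-- from typing import List, Optional, Tuple, Dict
--
-- def _index_match(word: str, first: str, second: str, index: List[int]) -> bool:
--     """
--     indexMatch - Find indices of first and second patterns in word
--     """
--     first_last = word.rfind(first)
--     second_last = word.rfind(second)
--
--     while first_last > 0:
--         if first_last < second_last:
--             index[0] = first_last
--             index[1] = second_last
--             return True
--         else:
--             first_last = word.rfind(first, 0, first_last)
--
--     index[0] = 0
--     index[1] = 0
--     return False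
-- ===== SOURCE B (Python) =====
-- def _index_match(word, first, second, index):
--     second_last = word.rfind(second)
--     valid = [p for p in range(len(word))
--              if 0 < p < second_last and word.startswith(first, p)]
--     if valid:
--         index[0] = valid[-1]
--         index[1] = second_last
--         return True
--     index[0] = 0
--     index[1] = 0
--     return False
-- ===== Notes on version B (the rewrite author's own statement) =====
-- stated objective: simpler
-- what changed: B replaces A's while-loop of repeated right-to-left rfind rescans by one pass that enumerates all start positions of `first`, keeps those strictly between 0 and the last occurrence of `second`, and takes the largest; same mutation of `index`.
-- outside the precondition, e.g. on _index_match('aaaa', 'aa', 'aa', [0, 0]): A returns False, B returns True; on _index_match('a', '', 'a', [0, 0]): A does not finish within the time limit, B returns False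
import Mathlib
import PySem

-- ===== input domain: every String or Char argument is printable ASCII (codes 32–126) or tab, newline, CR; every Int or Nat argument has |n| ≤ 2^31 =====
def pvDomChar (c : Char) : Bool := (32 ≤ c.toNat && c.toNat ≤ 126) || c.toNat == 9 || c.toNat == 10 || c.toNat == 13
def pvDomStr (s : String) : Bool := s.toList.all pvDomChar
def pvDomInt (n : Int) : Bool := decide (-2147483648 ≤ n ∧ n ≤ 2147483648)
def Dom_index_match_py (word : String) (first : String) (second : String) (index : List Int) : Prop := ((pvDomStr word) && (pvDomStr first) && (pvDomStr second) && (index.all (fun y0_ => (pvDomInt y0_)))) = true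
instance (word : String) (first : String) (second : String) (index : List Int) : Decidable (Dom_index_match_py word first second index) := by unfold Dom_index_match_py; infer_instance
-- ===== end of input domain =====

-- B replaces A's repeated right-to-left rfind rescan loop by one pass that enumerates all
-- start positions of `first` and selects the largest one strictly between 0 and the last
-- occurrence of `second`; equivalence proved for the RETURN value only (both Pythons also
-- mutate `index` — they write the same values on Pre_, but that is not part of the claim).


-- ===== PORT A =====
-- pvOccAt w f p = Python w.startswith(f, p) (p a non-negative index)
def pvOccAt (w f : List Char) (p : Nat) : Bool := (w.drop p).take f.length == f

-- pvRfindAux w f c = greatest p ≤ c with a match of f at p in w, else -1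
def pvRfindAux (w f : List Char) : Nat → Int
  | 0 => if pvOccAt w f 0 then 0 else -1
  | p + 1 => if pvOccAt w f (p + 1) then ((p : Int) + 1) else pvRfindAux w f p

-- hand port of Python w.rfind(f, 0, e) for a non-negative end bound e (exact there):
-- the match must lie entirely inside w[0:e]; '' is found at min e |w|
def pvRfind (w f : List Char) (e : Nat) : Int :=
  if f.length ≤ min e w.length then pvRfindAux w f (min e w.length - f.length) else -1

-- the while-loop of A; fuel |w|+1 covers every terminating run (each rescan strictly
-- decreases first_last, which starts below |w|; only first = '' with word ≠ '' loops
-- forever in Python, and that is outside Pre_)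
def pvLoopA (w f : List Char) (sl : Int) : Nat → Int → Bool
  | 0, _ => false
  | fuel + 1, fl =>
    if 0 < fl then
      if fl < sl then true
      else pvLoopA w f sl fuel (pvRfind w f fl.toNat)
    else false

def index_match_py (word : String) (first : String) (second : String) (index : List Int) : Bool :=
  pvLoopA word.toList first.toList (pvRfind word.toList second.toList word.toList.length)
    (word.toList.length + 1) (pvRfind word.toList first.toList word.toList.length)

-- ===== PORT B =====
def index_match_py_alt (word : String) (first : String) (second : String) (index : List Int) : Bool :=
  !((List.range word.toList.length).filter
      (fun p : Nat => decide (0 < p) &&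
        decide ((p : Int) < pvRfind word.toList second.toList word.toList.length) &&
        pvOccAt word.toList first.toList p)).isEmpty

-- ===== PRECONDITION & SPEC =====
-- Pre_ excludes (i) first = '' with word ≠ '', where A's rescan never advances and Python A
-- loops forever, and (ii) words in which occurrences of `first` overlap, where A's
-- end-exclusive rescan rfind(first, 0, first_last) counts only non-overlapping matches while
-- any plain enumeration counts all of them — both match conventions are defensible
-- (cf. str.count, which is also non-overlapping), so neither value is the specified one.
-- It also requires 2 ≤ index.length: with fewer elements A's writes index[0]/index[1]
-- raise IndexError on every path.
def Pre_index_match_py (word : String) (first : String) (second : String) (index : List Int) : Prop :=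
  2 ≤ index.length ∧ (first ≠ "" ∨ word = "") ∧
  ∀ p < word.toList.length, ∀ q < word.toList.length,
    p < q → pvOccAt word.toList first.toList p = true → pvOccAt word.toList first.toList q = true →
    p + first.toList.length ≤ q
instance (word : String) (first : String) (second : String) (index : List Int) : Decidable (Pre_index_match_py word first second index) := by unfold Pre_index_match_py; infer_instance

def pvWitness_index_match_py : String × String × String × List Int := ("abcabc", "b", "c", [0, 0])

def Spec_index_match_py (word : String) (first : String) (second : String) (index : List Int) (out : Bool) : Prop := out = index_match_py_alt word first second index
instance (word : String) (first : String) (second : String) (index : List Int) (out : Bool) : Decidable (Spec_index_match_py word first second index out) := by unfold Spec_index_match_py; infer_instance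

-- ===== CLAIM (what is proved, stated in full; the proofs are below) =====
def Claim_equal_index_match_py : Prop := ∀ (word : String) (first : String) (second : String) (index : List Int), Dom_index_match_py word first second index → Pre_index_match_py word first second index → Spec_index_match_py word first second index (index_match_py word first second index)

-- ===== LEMMAS AND PROOFS =====

theorem pvOccAt_add_length_le (w f : List Char) (p : Nat) (hf : f ≠ [])
    (h : pvOccAt w f p = true) : p + f.length ≤ w.length := by
  have hL : 0 < f.length := List.length_pos_iff.mpr hf
  unfold pvOccAt at h
  have hlen : ((w.drop p).take f.length).length = f.length := by
    rw [(beq_iff_eq).mp h]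
  simp only [List.length_take, List.length_drop] at hlen
  omega

theorem pvRfindAux_spec (w f : List Char) (c : Nat) :
    (pvRfindAux w f c = -1 ∧ ∀ p ≤ c, pvOccAt w f p = false) ∨
    (∃ n : Nat, pvRfindAux w f c = (n : Int) ∧ n ≤ c ∧ pvOccAt w f n = true ∧
      ∀ p ≤ c, pvOccAt w f p = true → p ≤ n) := by
  induction c with
  | zero =>
    by_cases h : pvOccAt w f 0 = true
    · right; exact ⟨0, by simp [pvRfindAux, h], le_refl 0, h, fun p hp _ => hp⟩
    · left
      refine ⟨by simp [pvRfindAux, h], fun p hp => ?_⟩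
      interval_cases p
      · simpa using h
  | succ c ih =>
    by_cases h : pvOccAt w f (c + 1) = true
    · right
      exact ⟨c + 1, by simp [pvRfindAux, h], le_refl _, h, fun p hp _ => hp⟩
    · have hstep : pvRfindAux w f (c + 1) = pvRfindAux w f c := by simp [pvRfindAux, h]
      rcases ih with ⟨h1, h2⟩ | ⟨n, h1, h2, h3, h4⟩
      · left
        refine ⟨hstep.trans h1, fun p hp => ?_⟩
        rcases Nat.lt_or_ge p (c + 1) with hlt | hge
        · exact h2 p (by omega)
        · have : p = c + 1 := by omega
          subst this; simpa using h
      · right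
        refine ⟨n, hstep.trans h1, by omega, h3, fun p hp hop => ?_⟩
        rcases Nat.lt_or_ge p (c + 1) with hlt | hge
        · exact h4 p (by omega) hop
        · have : p = c + 1 := by omega
          subst this; exact absurd hop (by simpa using h)

theorem pvRfindAux_congr (w f : List Char) (a b : Nat) (hab : a ≤ b)
    (h : ∀ q, a < q → q ≤ b → pvOccAt w f q = false) :
    pvRfindAux w f b = pvRfindAux w f a := by
  induction b with
  | zero =>
    have : a = 0 := by omega
    subst this; rfl
  | succ b ih =>
    rcases Nat.lt_or_ge a (b + 1) with hlt | hge
    · have hb : pvOccAt w f (b + 1) = false := h (b + 1) (by omega) (le_refl _)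
      have hstep : pvRfindAux w f (b + 1) = pvRfindAux w f b := by
        simp [pvRfindAux, hb]
      rw [hstep, ih (by omega) (fun q hq1 hq2 => h q hq1 (by omega))]
    · have : a = b + 1 := by omega
      subst this; rfl

theorem pvLoopA_neg (w f : List Char) (sl fl : Int) (fuel : Nat) (h : ¬ 0 < fl) :
    pvLoopA w f sl fuel fl = false := by
  cases fuel with
  | zero => rfl
  | succ n => simp [pvLoopA, h]

-- the loop invariant: starting from the greatest match position ≤ c, A's loop decides
-- whether some match position p with 0 < p and p < sl lies in [0, c]
theorem pvLoopA_spec (w f : List Char) (hf : f ≠ [])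
    (hov : ∀ p q : Nat, p < q → pvOccAt w f p = true → pvOccAt w f q = true → p + f.length ≤ q)
    (sl : Int) :
    ∀ fuel c : Nat, c < fuel →
      pvLoopA w f sl fuel (pvRfindAux w f c) =
        decide (∃ p : Nat, p ≤ c ∧ 0 < p ∧ (p : Int) < sl ∧ pvOccAt w f p = true) := by
  intro fuel
  induction fuel with
  | zero => intro c hc; omega
  | succ fuel ih =>
    intro c hc
    rcases pvRfindAux_spec w f c with ⟨h1, h2⟩ | ⟨n, h1, h2, h3, h4⟩
    · rw [h1, pvLoopA_neg _ _ _ _ _ (by norm_num)]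
      symm
      simp only [decide_eq_false_iff_not]
      rintro ⟨p, hp1, _, _, hp4⟩
      rw [h2 p hp1] at hp4; exact absurd hp4 (by simp)
    · rw [h1]
      rcases Nat.eq_zero_or_pos n with hn0 | hnpos
      · subst hn0
        rw [pvLoopA_neg _ _ _ _ _ (by norm_num)]
        symm
        simp only [decide_eq_false_iff_not]
        rintro ⟨p, hp1, hp2, _, hp4⟩
        have := h4 p hp1 hp4; omega
      · have hfl : (0 : Int) < (n : Int) := by exact_mod_cast hnpos
        by_cases hsl : (n : Int) < sl
        · have hloop : pvLoopA w f sl (fuel + 1) (n : Int) = true := by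
            simp only [pvLoopA, if_pos hfl, if_pos hsl]
          rw [hloop]
          symm
          simp only [decide_eq_true_eq]
          exact ⟨n, h2, hnpos, hsl, h3⟩
        · have hstep : pvLoopA w f sl (fuel + 1) (n : Int) =
              pvLoopA w f sl fuel (pvRfind w f n) := by
            simp only [pvLoopA, if_pos hfl, if_neg hsl, Int.toNat_natCast]
          rw [hstep]
          have hnlen : n + f.length ≤ w.length := pvOccAt_add_length_le w f n hf h3
          have hL1 : 1 ≤ f.length := List.length_pos_iff.mpr hf
          have hmin : min n w.length = n := by omega
          by_cases hLn : f.length ≤ n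
          · have hrf : pvRfind w f n = pvRfindAux w f (n - 1) := by
              unfold pvRfind
              rw [hmin, if_pos hLn]
              exact (pvRfindAux_congr w f (n - f.length) (n - 1) (by omega)
                (fun q hq1 hq2 => by
                  by_contra hq
                  have hq' : pvOccAt w f q = true := by
                    simpa using hq
                  have := hov q n (by omega) hq' h3
                  omega)).symm
            rw [hrf, ih (n - 1) (by omega)]
            apply decide_eq_decide.mpr
            constructor
            · rintro ⟨p, hp1, hp2, hp3, hp4⟩
              exact ⟨p, by omega, hp2, hp3, hp4⟩
            · rintro ⟨p, hp1, hp2, hp3, hp4⟩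
              have hpn : p ≤ n := h4 p hp1 hp4
              have hpltn : p < n := by
                by_contra hc'
                have : p = n := by omega
                subst this; exact hsl hp3
              exact ⟨p, by omega, hp2, hp3, hp4⟩
          · have hrf : pvRfind w f n = -1 := by
              unfold pvRfind
              rw [hmin, if_neg (by omega)]
            rw [hrf, pvLoopA_neg _ _ _ _ _ (by norm_num)]
            symm
            simp only [decide_eq_false_iff_not]
            rintro ⟨p, hp1, hp2, hp3, hp4⟩
            have hpn : p ≤ n := h4 p hp1 hp4
            rcases Nat.lt_or_ge p n with hlt | hge
            · have := hov p n hlt hp4 h3; omega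
            · have : p = n := by omega
              subst this; exact hsl hp3

-- B's result as the same existential
theorem alt_characterization (word first second : String) (index : List Int) :
    index_match_py_alt word first second index =
      decide (∃ p : Nat, p < word.toList.length ∧ 0 < p ∧
        (p : Int) < pvRfind word.toList second.toList word.toList.length ∧
        pvOccAt word.toList first.toList p = true) := by
  unfold index_match_py_alt
  rcases Bool.eq_false_or_eq_true ((List.range word.toList.length).filter
      (fun p : Nat => decide (0 < p) &&
        decide ((p : Int) < pvRfind word.toList second.toList word.toList.length) &&
        pvOccAt word.toList first.toList p)).isEmpty with he | he
  · rw [he]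
    symm
    simp only [Bool.not_true, decide_eq_false_iff_not]
    rintro ⟨p, hp1, hp2, hp3, hp4⟩
    rw [List.isEmpty_iff] at he
    have hmem : p ∈ (List.range word.toList.length).filter
        (fun p : Nat => decide (0 < p) &&
          decide ((p : Int) < pvRfind word.toList second.toList word.toList.length) &&
          pvOccAt word.toList first.toList p) := by
      rw [List.mem_filter, List.mem_range]
      exact ⟨hp1, by simp only [Bool.and_eq_true, decide_eq_true_eq]; exact ⟨⟨hp2, hp3⟩, hp4⟩⟩
    rw [he] at hmem
    exact absurd hmem (List.not_mem_nil)
  · rw [he]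
    symm
    simp only [Bool.not_false, decide_eq_true_eq]
    rcases List.isEmpty_eq_false_iff_exists_mem.mp he with ⟨p, hp⟩
    rw [List.mem_filter, List.mem_range] at hp
    obtain ⟨hp1, hp2⟩ := hp
    simp only [Bool.and_eq_true, decide_eq_true_eq] at hp2
    exact ⟨p, hp1, hp2.1.1, hp2.1.2, hp2.2⟩

-- ===== VERDICT (by name: the statement is the Claim_ definition above) =====
theorem index_match_py_spec : Claim_equal_index_match_py := by
  intro word first second index _ hpre
  unfold Spec_index_match_py
  obtain ⟨-, hfe, hov'⟩ := hpre
  rw [alt_characterization]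
  unfold index_match_py
  by_cases hw : word.toList.length = 0
  · -- word = "": both sides are false
    have hwl : word.toList = [] := List.length_eq_zero_iff.mp hw
    rw [hwl]
    have hfl : pvLoopA [] first.toList (pvRfind [] second.toList ([] : List Char).length)
        (([] : List Char).length + 1) (pvRfind [] first.toList ([] : List Char).length) = false := by
      by_cases hf0 : first.toList.length = 0
      · have hfnil : first.toList = [] := List.length_eq_zero_iff.mp hf0
        rw [hfnil]
        simp [pvRfind, pvRfindAux, pvOccAt, pvLoopA]
      · have hneg : pvRfind [] first.toList ([] : List Char).length = -1 := by
          unfold pvRfind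
          rw [if_neg (by simp only [List.length_nil, Nat.min_self, Nat.le_zero]; exact hf0)]
        rw [hneg]
        exact pvLoopA_neg _ _ _ _ _ (by norm_num)
    rw [hfl]
    symm
    simp only [decide_eq_false_iff_not]
    rintro ⟨p, hp1, _⟩
    simp at hp1
  · -- word ≠ "", hence first ≠ ""
    have hf : first.toList ≠ [] := by
      rcases hfe with hf' | hw'
      · intro hcon
        exact hf' (String.toList_inj.mp (hcon : first.toList = ("" : String).toList))
      · exfalso; apply hw; rw [hw']; rfl
    have hL1 : 1 ≤ first.toList.length := List.length_pos_iff.mpr hf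
    have hov : ∀ p q : Nat, p < q → pvOccAt word.toList first.toList p = true →
        pvOccAt word.toList first.toList q = true → p + first.toList.length ≤ q := by
      intro p q hpq hop hoq
      have hq : q + first.toList.length ≤ word.toList.length :=
        pvOccAt_add_length_le _ _ _ hf hoq
      exact hov' p (by omega) q (by omega) hpq hop hoq
    by_cases hLw : first.toList.length ≤ word.toList.length
    · have hrf : pvRfind word.toList first.toList word.toList.length =
          pvRfindAux word.toList first.toList (word.toList.length - first.toList.length) := by
        unfold pvRfind
        rw [Nat.min_self, if_pos hLw]
      rw [hrf, pvLoopA_spec word.toList first.toList hf hov _ (word.toList.length + 1)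
        (word.toList.length - first.toList.length) (by omega)]
      apply decide_eq_decide.mpr
      constructor
      · rintro ⟨p, hp1, hp2, hp3, hp4⟩
        exact ⟨p, by omega, hp2, hp3, hp4⟩
      · rintro ⟨p, hp1, hp2, hp3, hp4⟩
        have := pvOccAt_add_length_le _ _ _ hf hp4
        exact ⟨p, by omega, hp2, hp3, hp4⟩
    · have hrf : pvRfind word.toList first.toList word.toList.length = -1 := by
        unfold pvRfind
        rw [Nat.min_self, if_neg (by omega)]
      rw [hrf, pvLoopA_neg _ _ _ _ _ (by norm_num)]
      symm
      simp only [decide_eq_false_iff_not]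
      rintro ⟨p, hp1, hp2, hp3, hp4⟩
      have := pvOccAt_add_length_le _ _ _ hf hp4
      omega
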